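-- pv_equiv track=rewrite | github.com/DavidCGordon/Product-Registers | ProductRegisters/Tools/BooleanFunctionTools.py | stateTable
-- ===== SOURCE A (Python) =====
-- def stateTable(size,stateLoops):
--     table = []
--     for i in range(2**size):
--         bitStr = format(i, "0" + str(size) + "b")
--
--         #look for bitStr in stateloops, then append it's successor:
--         for loop in stateLoops:
--             for idx in range(len(loop)):
--                 if loop[idx] == bitStr:
--                     table.append(loop[(idx + 1) % len(loop)])
--
--     return table
-- ===== SOURCE B (Python) =====
-- def stateTable(size, stateLoops):
--     # index every state's successors once, then walk the states in order
--     succs = {}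
--     for loop in stateLoops:
--         for idx, state in enumerate(loop):
--             succs.setdefault(state, []).append(loop[(idx + 1) % len(loop)])
--     table = []
--     for i in range(2**size):
--         table += succs.get(format(i, "0" + str(size) + "b"), [])
--     return table
-- ===== Notes on version B (the rewrite author's own statement) =====
-- stated objective: alternative
-- what changed: B builds a dict from each state string to its list of successors in one pass over stateLoops and then emits the dict entry for each formatted state in order, removing A's per-state scan of every loop (intended to remove the inner scan; a timing run could not confirm an overall speedup since both still enumerate 2^size states); Pre_ excludes size < 0, where A raises TypeError (range of a float 2**size).
import Mathlib
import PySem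

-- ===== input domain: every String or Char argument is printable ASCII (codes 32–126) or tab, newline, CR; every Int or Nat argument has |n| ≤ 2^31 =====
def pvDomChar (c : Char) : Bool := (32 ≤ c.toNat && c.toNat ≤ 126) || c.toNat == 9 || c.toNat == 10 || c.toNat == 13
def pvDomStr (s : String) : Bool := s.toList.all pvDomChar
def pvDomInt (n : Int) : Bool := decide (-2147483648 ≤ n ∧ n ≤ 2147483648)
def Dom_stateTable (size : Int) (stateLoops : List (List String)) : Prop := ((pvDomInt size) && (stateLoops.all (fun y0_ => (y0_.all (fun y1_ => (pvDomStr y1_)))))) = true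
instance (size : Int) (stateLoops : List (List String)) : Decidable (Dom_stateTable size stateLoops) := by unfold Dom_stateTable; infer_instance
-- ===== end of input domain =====

-- B indexes every state's successors in a dict built in one pass over stateLoops, then emits the
-- dict entry for each formatted state in order, removing A's per-state scan of every loop.

-- ===== PORT A =====
-- hand-ported builtin: pvBinChars/pvFormatBin implement format(i, "0"+str(size)+"b"),
-- exact for i ≥ 0 and size ≥ 0 (minimal binary digits, left-padded with '0' to width size)
def pvBinChars (i : Nat) : List Char :=
  if i < 2 then [if i == 1 then '1' else '0']
  else pvBinChars (i / 2) ++ [if i % 2 == 1 then '1' else '0']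
decreasing_by exact Nat.div_lt_self (by omega) (by omega)

def pvFormatBin (size : Int) (i : Nat) : String :=
  String.ofList (List.replicate (size.toNat - (pvBinChars i).length) '0' ++ pvBinChars i)

def stateTable (size : Int) (stateLoops : List (List String)) : List String :=
  -- for i in range(2**size): …  (2**size ported as 2^size.toNat; Pre_ gives 0 ≤ size)
  (PySem.List.pyRange 0 ((2 : Int) ^ size.toNat) 1).foldl (fun table i =>
    let bitStr := pvFormatBin size i.toNat
    stateLoops.foldl (fun table loop =>
      (PySem.List.pyRange 0 (loop.length : Int) 1).foldl (fun table idx =>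
        if PySem.List.pyGetD loop idx "" == bitStr then
          table ++ [PySem.List.pyGetD loop (PySem.Int.mod (idx + 1) (loop.length : Int)) ""]
        else table) table) table) []

-- ===== PORT B =====
def stateTable_alt (size : Int) (stateLoops : List (List String)) : List String :=
  let succs : PySem.Dict String (List String) :=
    stateLoops.foldl (fun d loop =>
      (PySem.List.enumerate loop).foldl (fun d p =>
        d.modify p.2 []
          (fun l => l ++ [PySem.List.pyGetD loop (PySem.Int.mod (p.1 + 1) (loop.length : Int)) ""])) d)
      PySem.Dict.empty
  (PySem.List.pyRange 0 ((2 : Int) ^ size.toNat) 1).foldl (fun table i =>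
    table ++ succs.getD (pvFormatBin size i.toNat) []) []

-- ===== PRECONDITION & SPEC =====
-- Pre_ excludes size < 0, where the Python A raises TypeError (range(2**size) on a float).
def Pre_stateTable (size : Int) (stateLoops : List (List String)) : Prop := 0 ≤ size
instance (size : Int) (stateLoops : List (List String)) : Decidable (Pre_stateTable size stateLoops) := by unfold Pre_stateTable; infer_instance
def pvWitness_stateTable : Int × List (List String) := (2, [["00", "01"], ["10"]])

def Spec_stateTable (size : Int) (stateLoops : List (List String)) (out : List String) : Prop := out = stateTable_alt size stateLoops
instance (size : Int) (stateLoops : List (List String)) (out : List String) : Decidable (Spec_stateTable size stateLoops out) := by unfold Spec_stateTable; infer_instance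

-- ===== CLAIM (what is proved, stated in full; the proofs are below) =====
def Claim_equal_stateTable : Prop := ∀ (size : Int) (stateLoops : List (List String)), Dom_stateTable size stateLoops → Pre_stateTable size stateLoops → Spec_stateTable size stateLoops (stateTable size stateLoops)

-- ===== LEMMAS AND PROOFS =====

-- the (state, successor) pairs B indexes, as a flat list, and the bucket of a state string
def pvSucc (loop : List String) (idx : Int) : String :=
  PySem.List.pyGetD loop (PySem.Int.mod (idx + 1) (loop.length : Int)) ""

def pvAllPairs (stateLoops : List (List String)) : List (String × String) :=
  stateLoops.flatMap (fun loop => (PySem.List.enumerate loop).map (fun p => (p.2, pvSucc loop p.1)))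

def pvBucket (stateLoops : List (List String)) (s : String) : List String :=
  (((pvAllPairs stateLoops).filter (fun p => p.1 == s)).map (·.2))

def pvUpd (d : PySem.Dict String (List String)) (p : String × String) : PySem.Dict String (List String) :=
  d.modify p.1 [] (fun l => l ++ [p.2])

theorem pvFoldl_getD (l : List (String × String)) (d : PySem.Dict String (List String)) (s : String) :
    (l.foldl pvUpd d).getD s [] = d.getD s [] ++ ((l.filter (fun p => p.1 == s)).map (·.2)) := by
  induction l generalizing d with
  | nil => simp
  | cons a t ih =>
    rw [List.foldl_cons, ih, List.filter_cons]
    by_cases h : a.1 = s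
    · subst h
      simp only [beq_self_eq_true, if_pos]
      rw [pvUpd, PySem.Dict.getD_modify]
      simp
    · rw [if_neg (by simpa using h)]
      rw [pvUpd, PySem.Dict.getD_modify, if_neg (by simpa using fun hx => h hx.symm)]

-- B's dict is the fold of pvUpd over the flat pair list
theorem pvBuckets_eq (stateLoops : List (List String)) :
    (stateLoops.foldl (fun d loop =>
      (PySem.List.enumerate loop).foldl (fun d p =>
        d.modify p.2 []
          (fun l => l ++ [PySem.List.pyGetD loop (PySem.Int.mod (p.1 + 1) (loop.length : Int)) ""])) d)
      (PySem.Dict.empty : PySem.Dict String (List String)))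
    = (pvAllPairs stateLoops).foldl pvUpd PySem.Dict.empty := by
  unfold pvAllPairs
  rw [List.foldl_flatMap]
  apply PySem.List.foldl_congr_mem
  intro d loop _
  rw [List.foldl_map]
  rfl

theorem pvB_eq (size : Int) (stateLoops : List (List String)) :
    stateTable_alt size stateLoops
    = (PySem.List.pyRange 0 ((2 : Int) ^ size.toNat) 1).flatMap
        (fun i => pvBucket stateLoops (pvFormatBin size i.toNat)) := by
  unfold stateTable_alt
  rw [pvBuckets_eq, PySem.List.foldl_append_eq_flatMap, List.nil_append]
  apply List.flatMap_congr
  intro i _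
  rw [pvFoldl_getD]
  simp [pvBucket]

theorem pvA_eq (size : Int) (stateLoops : List (List String)) :
    stateTable size stateLoops
    = (PySem.List.pyRange 0 ((2 : Int) ^ size.toNat) 1).flatMap
        (fun i => pvBucket stateLoops (pvFormatBin size i.toNat)) := by
  unfold stateTable
  have hinner : ∀ (i : Int) (t : List String),
      stateLoops.foldl (fun table loop =>
        (PySem.List.pyRange 0 (loop.length : Int) 1).foldl (fun table idx =>
          if PySem.List.pyGetD loop idx "" == pvFormatBin size i.toNat then
            table ++ [PySem.List.pyGetD loop (PySem.Int.mod (idx + 1) (loop.length : Int)) ""]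
          else table) table) t
      = t ++ stateLoops.flatMap (fun loop =>
          ((PySem.List.pyRange 0 (loop.length : Int) 1).filter
            (fun idx => PySem.List.pyGetD loop idx "" == pvFormatBin size i.toNat)).map
            (fun idx => PySem.List.pyGetD loop (PySem.Int.mod (idx + 1) (loop.length : Int)) "")) := by
    intro i t
    rw [PySem.List.foldl_congr_mem stateLoops _ (fun table loop => table ++
          ((PySem.List.pyRange 0 (loop.length : Int) 1).filter
            (fun idx => PySem.List.pyGetD loop idx "" == pvFormatBin size i.toNat)).map
            (fun idx => PySem.List.pyGetD loop (PySem.Int.mod (idx + 1) (loop.length : Int)) "")) t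
        (fun acc loop _ => PySem.List.foldl_append_if _ _ _ _)]
    exact PySem.List.foldl_append_eq_flatMap _ _ _
  rw [PySem.List.foldl_congr_mem _ _ (fun (table : List String) (i : Int) => table ++
        stateLoops.flatMap (fun loop =>
          ((PySem.List.pyRange 0 (loop.length : Int) 1).filter
            (fun idx => PySem.List.pyGetD loop idx "" == pvFormatBin size i.toNat)).map
            (fun idx => PySem.List.pyGetD loop (PySem.Int.mod (idx + 1) (loop.length : Int)) ""))) []
      (fun acc i _ => hinner i acc)]
  rw [PySem.List.foldl_append_eq_flatMap, List.nil_append]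
  apply List.flatMap_congr
  intro i _
  unfold pvBucket pvAllPairs
  rw [List.filter_flatMap, List.map_flatMap]
  apply List.flatMap_congr
  intro loop _
  rw [PySem.List.enumerate_eq_map_pyRange loop "", List.map_map, List.filter_map, List.map_map]
  have hlen : PySem.List.len loop = (loop.length : Int) := PySem.List.len_eq loop
  rw [hlen]
  rfl

-- ===== VERDICT (by name: the statement is the Claim_ definition above) =====
theorem stateTable_spec : Claim_equal_stateTable := by
  intro size stateLoops _ _
  unfold Spec_stateTable
  rw [pvA_eq, pvB_eq]
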